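-- pv_equiv track=rewrite | github.com/jameleu/set_cover_shopping | shopping_helper.py | proper_inventory
-- ===== SOURCE A (Python) =====
-- def inventory_score(shopping_list, total_inventory):
--     sum = 0
--     for item in shopping_list:
--         #item score = desired amount - inventory amount (potentially 0, hence the else)
--         if item in total_inventory:
--             item_score =  shopping_list[item] - total_inventory[item]
--         else:
--             item_score = shopping_list[item]
--         if item_score > 0: #add penalty to sum score if not covered
--             sum += item_score
--         #otherwise, do not add penalty to sum score
--     return sum
--
-- def proper_inventory(shopping_list, inventory):
--     total_inventory = {}
--     #check each store, and its items, and add those to total inventory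
--     for shop in inventory["stores"]:
--         for item in shop["inventory"]:
--             #add or start new key with value of the inventory of curr item
--             if item in total_inventory:
--                 total_inventory[item] += shop["inventory"][item]
--             else:
--                 total_inventory[item] = shop["inventory"][item]
--
--     score = inventory_score(shopping_list, total_inventory)
--     return score <= 0 # returns true if shopping list
-- ===== SOURCE B (Python) =====
-- def proper_inventory(shopping_list, inventory):
--     # Per-item check: an item is covered iff its desired amount does not exceed
--     # the total of that item across all stores; no combined inventory dict is built.
--     stores = inventory["stores"]
--     return all(
--         amount <= sum(shop["inventory"].get(item, 0) for shop in stores)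
--         for item, amount in shopping_list.items()
--     )
-- ===== Notes on version B (the rewrite author's own statement) =====
-- stated objective: simpler
-- what changed: B drops A's aggregate-then-score pass (building a combined inventory dict and summing positive shortfall penalties) and instead checks each shopping-list item directly against the sum of its quantity across all stores, with all()/sum() generator expressions.
import Mathlib
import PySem

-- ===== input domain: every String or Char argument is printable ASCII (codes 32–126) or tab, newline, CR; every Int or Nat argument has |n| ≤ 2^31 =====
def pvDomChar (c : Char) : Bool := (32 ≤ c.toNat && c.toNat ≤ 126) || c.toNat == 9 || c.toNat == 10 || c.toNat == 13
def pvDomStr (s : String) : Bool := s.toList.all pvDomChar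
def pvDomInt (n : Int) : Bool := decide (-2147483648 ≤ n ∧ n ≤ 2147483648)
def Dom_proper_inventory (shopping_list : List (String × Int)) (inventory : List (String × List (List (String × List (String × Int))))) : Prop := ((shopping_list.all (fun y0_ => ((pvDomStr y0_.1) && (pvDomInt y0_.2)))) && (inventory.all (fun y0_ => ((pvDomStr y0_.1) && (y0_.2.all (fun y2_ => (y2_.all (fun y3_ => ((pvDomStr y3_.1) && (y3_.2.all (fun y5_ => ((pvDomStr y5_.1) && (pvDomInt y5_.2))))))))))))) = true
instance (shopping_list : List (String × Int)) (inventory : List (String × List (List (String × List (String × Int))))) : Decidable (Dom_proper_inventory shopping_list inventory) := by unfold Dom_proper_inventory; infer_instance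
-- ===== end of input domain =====

-- B replaces A's "build a combined inventory dict, then sum positive shortfalls" with a direct
-- per-item all/sum check against the stores; objective: simpler. Equal wherever A returns.

-- ===== PORT A =====
-- literal port of inventory_score: iterate the shopping dict's items (keys are unique under
-- Pre_), penalise each positive shortfall, return the accumulated penalty sum
def item_score (total_inventory : PySem.Dict String Int) (p : String × Int) : Int :=
  match total_inventory.get? p.1 with
  | some v => p.2 - v
  | none => p.2

def inventory_score (shopping_list : List (String × Int)) (total_inventory : PySem.Dict String Int) : Int :=
  shopping_list.foldl (fun sum p =>
    if item_score total_inventory p > 0 then sum + item_score total_inventory p else sum) 0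

-- literal port of A: build total_inventory by looping over inventory["stores"] and each
-- shop["inventory"], then return (score <= 0); dict lookups are first-match (keys unique under Pre_)
def proper_inventory (shopping_list : List (String × Int)) (inventory : List (String × List (List (String × List (String × Int))))) : Bool :=
  let stores := (PySem.Dict.mk inventory).getD "stores" []
  let total_inventory :=
    stores.foldl (fun t shop =>
      ((PySem.Dict.mk shop).getD "inventory" []).foldl (fun t p =>
        if t.contains p.1 then t.insert p.1 (t.getD p.1 0 + p.2)
        else t.insert p.1 p.2) t) PySem.Dict.empty
  decide (inventory_score shopping_list total_inventory ≤ 0)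

-- ===== PORT B =====
-- port of Source B: every shopping item's amount must not exceed the sum of that item's
-- quantity over all stores (shop["inventory"].get(item, 0))
def proper_inventory_alt (shopping_list : List (String × Int)) (inventory : List (String × List (List (String × List (String × Int))))) : Bool :=
  let stores := (PySem.Dict.mk inventory).getD "stores" []
  shopping_list.all (fun p =>
    decide (p.2 ≤ stores.foldl (fun s shop =>
      s + (PySem.Dict.mk ((PySem.Dict.mk shop).getD "inventory" [])).getD p.1 0) 0))

-- ===== PRECONDITION & SPEC =====
-- Pre_ requires the keys A raises KeyError without ("stores" at top level, "inventory" in each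
-- shop), and excludes duplicate keys inside any dict-typed argument: an association list with
-- repeated keys does not represent any Python dict, so neither behaviour there is A's.
def Pre_proper_inventory (shopping_list : List (String × Int)) (inventory : List (String × List (List (String × List (String × Int))))) : Prop :=
  (shopping_list.map Prod.fst).Nodup ∧
  (inventory.map Prod.fst).Nodup ∧
  "stores" ∈ inventory.map Prod.fst ∧
  ∀ p ∈ inventory, p.1 = "stores" →
    ∀ shop ∈ p.2,
      (shop.map Prod.fst).Nodup ∧ "inventory" ∈ shop.map Prod.fst ∧
      ∀ q ∈ shop, q.1 = "inventory" → (q.2.map Prod.fst).Nodup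
instance (shopping_list : List (String × Int)) (inventory : List (String × List (List (String × List (String × Int))))) : Decidable (Pre_proper_inventory shopping_list inventory) := by unfold Pre_proper_inventory; infer_instance

def pvWitness_proper_inventory : (List (String × Int)) × (List (String × List (List (String × List (String × Int))))) :=
  ([("apple", 2)], [("stores", [[("inventory", [("apple", 3)])]])])

def Spec_proper_inventory (shopping_list : List (String × Int)) (inventory : List (String × List (List (String × List (String × Int))))) (out : Bool) : Prop := out = proper_inventory_alt shopping_list inventory
instance (shopping_list : List (String × Int)) (inventory : List (String × List (List (String × List (String × Int))))) (out : Bool) : Decidable (Spec_proper_inventory shopping_list inventory out) := by unfold Spec_proper_inventory; infer_instance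

-- ===== CLAIM (what is proved, stated in full; the proofs are below) =====
def Claim_equal_proper_inventory : Prop := ∀ (shopping_list : List (String × Int)) (inventory : List (String × List (List (String × List (String × Int))))), Dom_proper_inventory shopping_list inventory → Pre_proper_inventory shopping_list inventory → Spec_proper_inventory shopping_list inventory (proper_inventory shopping_list inventory)

-- ===== LEMMAS AND PROOFS =====

-- the loop body of A's accumulation is an unconditional "insert (old + new)"
theorem accStep_eq (t : PySem.Dict String Int) (p : String × Int) :
    (if t.contains p.1 then t.insert p.1 (t.getD p.1 0 + p.2) else t.insert p.1 p.2)
      = t.insert p.1 (t.getD p.1 0 + p.2) := by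
  by_cases h : t.contains p.1
  · simp [h]
  · simp only [Bool.not_eq_true] at h
    simp [h, PySem.Dict.getD_of_not_contains t 0 h]

theorem accBody_eq :
    (fun (t : PySem.Dict String Int) (p : String × Int) =>
        if t.contains p.1 then t.insert p.1 (t.getD p.1 0 + p.2) else t.insert p.1 p.2)
      = fun t p => t.insert p.1 (t.getD p.1 0 + p.2) := by
  funext t p
  exact accStep_eq t p

-- one shop's inner loop adds, at each key, the sum of that shop's entries with that key
theorem getD_foldl_acc (l : List (String × Int)) (t : PySem.Dict String Int) (k : String) :
    (l.foldl (fun t p =>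
        if t.contains p.1 then t.insert p.1 (t.getD p.1 0 + p.2)
        else t.insert p.1 p.2) t).getD k 0
      = t.getD k 0 + ((l.filter (fun p => p.1 == k)).map Prod.snd).sum := by
  rw [accBody_eq]
  induction l generalizing t with
  | nil => simp
  | cons p l ih =>
    simp only [List.foldl_cons, ih, List.filter_cons]
    by_cases h : p.1 = k
    · simp only [beq_iff_eq, h, if_true, PySem.Dict.getD_insert]
      simp
      ring
    · simp [h, PySem.Dict.getD_insert, Ne.symm h]

-- a first-match lookup in a duplicate-free association list is the filter-sum
theorem getD_mk_eq_filter_sum (l : List (String × Int)) (k : String)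
    (h : (l.map Prod.fst).Nodup) :
    (PySem.Dict.mk l).getD k 0 = ((l.filter (fun p => p.1 == k)).map Prod.snd).sum := by
  induction l with
  | nil => simp [PySem.Dict.getD_eq_get?_getD, PySem.Dict.get?]
  | cons p l ih =>
    obtain ⟨a, b⟩ := p
    simp only [List.map_cons, List.nodup_cons] at h
    simp only [PySem.Dict.getD_eq_get?_getD, PySem.Dict.get?_mk_cons, List.filter_cons]
    by_cases hk : a = k
    · subst hk
      have hfil : l.filter (fun q => q.1 == a) = [] := by
        rw [List.filter_eq_nil_iff]
        intro q hq
        simp only [beq_iff_eq]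
        exact fun he => h.1 (he ▸ List.mem_map_of_mem hq)
      simp [hfil]
    · have hbeq : (a == k) = false := by simp [hk]
      simp only [hbeq, Bool.false_eq_true, if_false]
      rw [← PySem.Dict.getD_eq_get?_getD, ih h.2]

-- A's whole accumulation loop, read at one key
theorem getD_total (stores : List (List (String × List (String × Int))))
    (t : PySem.Dict String Int) (k : String) :
    ((stores.foldl (fun t shop =>
        ((PySem.Dict.mk shop).getD "inventory" []).foldl (fun t p =>
          if t.contains p.1 then t.insert p.1 (t.getD p.1 0 + p.2)
          else t.insert p.1 p.2) t) t).getD k 0)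
      = t.getD k 0 + (stores.map (fun shop =>
          ((((PySem.Dict.mk shop).getD "inventory" []).filter (fun p => p.1 == k)).map Prod.snd).sum)).sum := by
  induction stores generalizing t with
  | nil => simp
  | cons shop stores ih =>
    simp only [List.foldl_cons, List.map_cons, List.sum_cons, ih, getD_foldl_acc]
    ring

-- the penalty accumulator never decreases
theorem score_ge (sl : List (String × Int)) (t : PySem.Dict String Int) (c : Int) :
    c ≤ sl.foldl (fun sum p =>
      if item_score t p > 0 then sum + item_score t p else sum) c := by
  induction sl generalizing c with
  | nil => simp
  | cons p sl ih =>
    simp only [List.foldl_cons]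
    split
    · exact le_trans (by omega) (ih _)
    · exact ih c

-- the shortfall compares the desired amount with the looked-up total
theorem item_score_le_zero_iff (t : PySem.Dict String Int) (p : String × Int) :
    item_score t p ≤ 0 ↔ p.2 ≤ t.getD p.1 0 := by
  unfold item_score
  rw [PySem.Dict.getD_eq_get?_getD]
  cases t.get? p.1 <;> simp

-- score ≤ 0 iff every item's desired amount is at most its combined availability
theorem score_le_zero_iff (sl : List (String × Int)) (t : PySem.Dict String Int) :
    decide (inventory_score sl t ≤ 0) = sl.all (fun p => decide (p.2 ≤ t.getD p.1 0)) := by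
  unfold inventory_score
  have key : ∀ (sl : List (String × Int)) (c : Int),
      decide ((sl.foldl (fun sum p =>
        if item_score t p > 0 then sum + item_score t p else sum) c) ≤ c)
        = sl.all (fun p => decide (p.2 ≤ t.getD p.1 0)) := by
    intro sl
    induction sl with
    | nil => simp
    | cons p sl ih =>
      intro c
      simp only [List.foldl_cons, List.all_cons]
      by_cases hpos : item_score t p > 0
      · have h1 : ¬ (p.2 ≤ t.getD p.1 0) := by
          rw [← item_score_le_zero_iff]; omega
        have h2 : ¬ (sl.foldl (fun sum p =>
            if item_score t p > 0 then sum + item_score t p else sum)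
              (c + item_score t p) ≤ c) := by
          have := score_ge sl t (c + item_score t p)
          omega
        simp [hpos, h1, h2]
      · have h1 : p.2 ≤ t.getD p.1 0 := item_score_le_zero_iff t p |>.1 (by omega)
        simp only [hpos, if_false]
        rw [ih c]
        simp [h1]
  exact key sl 0

-- under Pre_, the value stored at "stores" / "inventory" is the (unique) list in the input
theorem getD_mem_of_mem_keys {ν : Type} (l : List (String × ν)) (k : String)
    (hnd : (l.map Prod.fst).Nodup) (hk : k ∈ l.map Prod.fst) (d0 : ν) :
    (k, (PySem.Dict.mk l).getD k d0) ∈ l := by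
  obtain ⟨p, hp, hp1⟩ := List.exists_of_mem_map hk
  have hkeys : (PySem.Dict.mk l).keys.Nodup := hnd
  have h1 : (PySem.Dict.mk l).get? k = some p.2 := by
    rw [PySem.Dict.get?_eq_some_iff_mem_items _ _ _ hkeys]
    show (k, p.2) ∈ l
    rw [← hp1]; exact hp
  rw [PySem.Dict.getD_eq_get?_getD, h1]
  rw [← hp1]
  exact hp

theorem all_congr_mem {α : Type} (l : List α) (f g : α → Bool)
    (h : ∀ x ∈ l, f x = g x) : l.all f = l.all g := by
  induction l with
  | nil => rfl
  | cons x l ih =>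
    simp only [List.all_cons, h x (List.mem_cons_self), ih (fun y hy => h y (List.mem_cons_of_mem x hy))]

-- ===== VERDICT (by name: the statement is the Claim_ definition above) =====
theorem proper_inventory_spec : Claim_equal_proper_inventory := by
  intro sl inv _hdom hpre
  obtain ⟨hslnd, hinvnd, hst, hshops⟩ := hpre
  unfold Spec_proper_inventory proper_inventory proper_inventory_alt
  set stores := (PySem.Dict.mk inv).getD "stores" [] with hstores
  have hmem : ("stores", stores) ∈ inv := getD_mem_of_mem_keys inv "stores" hinvnd hst []
  have hshop := hshops _ hmem rfl
  rw [score_le_zero_iff]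
  apply all_congr_mem
  intro p _hp
  congr 1
  rw [getD_total, PySem.Dict.getD_empty, zero_add, PySem.List.foldl_add, zero_add]
  congr 1
  congr 1
  apply List.map_congr_left
  intro shop hsm
  obtain ⟨hshopnd, hinvk, hinner⟩ := hshop shop hsm
  have hq : ("inventory", (PySem.Dict.mk shop).getD "inventory" []) ∈ shop :=
    getD_mem_of_mem_keys shop "inventory" hshopnd hinvk []
  rw [getD_mk_eq_filter_sum _ _ (hinner _ hq rfl)]
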